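-- pv_equiv track=rewrite | github.com/DIDONEproject/musif | musif/extract/features/harmony/utils.py | create_measures_extended
-- ===== SOURCE A (Python) =====
-- def create_measures_extended(measures):
--     new_measures=[]
--     new_measures.append(measures[0])
--     for i in range(1,len(measures)):
--         if measures[i] < max(measures[:i]):
--             if same_measure(measures, i):
--                 new_measures.append(new_measures[i-1])
--             else:
--                 new_measures.append(new_measures[i-1]+1)
--         else:
--             new_measures.append(measures[i])
--     return new_measures
--
-- def same_measure(measures, i):
--     return measures[i] == measures[i-1]
-- ===== SOURCE B (Python) =====
-- def create_measures_extended(measures):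
--     # One pass with a running prefix maximum instead of recomputing
--     # max(measures[:i]) at every step.
--     m0 = measures[0]
--     out = [m0]
--     running = m0
--     prev_val = m0
--     prev_out = m0
--     for m in measures[1:]:
--         if m < running:
--             new = prev_out if m == prev_val else prev_out + 1
--         else:
--             new = m
--         out.append(new)
--         if m > running:
--             running = m
--         prev_val = m
--         prev_out = new
--     return out
-- ===== Notes on version B (the rewrite author's own statement) =====
-- stated objective: faster
-- what changed: Replaces the per-iteration max(measures[:i]) rescan (and list indexing into new_measures) by a single left-to-right pass maintaining a running prefix maximum, the previous element and the previously emitted value.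
import Mathlib
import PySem

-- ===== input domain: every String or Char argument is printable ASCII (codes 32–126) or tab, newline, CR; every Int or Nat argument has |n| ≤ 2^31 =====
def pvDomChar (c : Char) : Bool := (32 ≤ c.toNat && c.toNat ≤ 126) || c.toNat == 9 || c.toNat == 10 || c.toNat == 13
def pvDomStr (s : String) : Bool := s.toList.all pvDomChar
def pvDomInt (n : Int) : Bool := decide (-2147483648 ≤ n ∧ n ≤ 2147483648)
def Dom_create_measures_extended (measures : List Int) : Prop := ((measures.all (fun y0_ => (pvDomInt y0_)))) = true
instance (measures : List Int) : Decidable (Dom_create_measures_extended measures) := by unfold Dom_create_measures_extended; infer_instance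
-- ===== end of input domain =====

-- B replaces A's quadratic max(measures[:i]) rescan by one pass with a running prefix maximum (objective: faster, asymptotic).

-- ===== PORT A =====
-- Python max(xs) on a nonempty list (the slice measures[:i] is nonempty for i ≥ 1);
-- the default for [] is never reached inside Pre_.
def pyMaxD (xs : List Int) : Int := (PySem.List.max? xs (fun y => y)).getD 0

-- same_measure(measures, i) == (measures[i] == measures[i-1])
def same_measure (measures : List Int) (i : Int) : Bool :=
  PySem.List.pyGetD measures i 0 == PySem.List.pyGetD measures (i - 1) 0

-- one iteration of A's 'for i in range(1, len(measures))' body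
def aStep (measures : List Int) (acc : List Int) (i : Int) : List Int :=
  if PySem.List.pyGetD measures i 0 < pyMaxD (PySem.List.slice measures none (some i)) then
    if same_measure measures i then
      acc ++ [PySem.List.pyGetD acc (i - 1) 0]
    else
      acc ++ [PySem.List.pyGetD acc (i - 1) 0 + 1]
  else
    acc ++ [PySem.List.pyGetD measures i 0]

def create_measures_extended (measures : List Int) : List Int :=
  match measures with
  | [] => []   -- measures[0] raises IndexError in Python; excluded by Pre_
  | m0 :: _ =>
    (PySem.List.pyRange 1 (measures.length : Int) 1).foldl (aStep measures) [m0]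

-- ===== PORT B =====
-- state: (out, running, prev_val, prev_out)
def bStep (st : List Int × Int × Int × Int) (m : Int) : List Int × Int × Int × Int :=
  let out := st.1
  let running := st.2.1
  let prevVal := st.2.2.1
  let prevOut := st.2.2.2
  let new := if m < running then (if m == prevVal then prevOut else prevOut + 1) else m
  (out ++ [new], if m > running then m else running, m, new)

def create_measures_extended_alt (measures : List Int) : List Int :=
  match measures with
  | [] => []   -- measures[0] raises IndexError in Python; excluded by Pre_
  | m0 :: rest => (rest.foldl bStep ([m0], m0, m0, m0)).1

-- ===== PRECONDITION & SPEC =====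
-- A (and B) raise IndexError on the empty list (measures[0]); only that input is excluded.
def Pre_create_measures_extended (measures : List Int) : Prop := measures ≠ []
instance (measures : List Int) : Decidable (Pre_create_measures_extended measures) := by unfold Pre_create_measures_extended; infer_instance

def pvWitness_create_measures_extended : List Int := [1, 2, 2, 1, 3]

def Spec_create_measures_extended (measures : List Int) (out : List Int) : Prop := out = create_measures_extended_alt measures
instance (measures : List Int) (out : List Int) : Decidable (Spec_create_measures_extended measures out) := by unfold Spec_create_measures_extended; infer_instance

-- ===== CLAIM (what is proved, stated in full; the proofs are below) =====
def Claim_equal_create_measures_extended : Prop := ∀ (measures : List Int), Dom_create_measures_extended measures → Pre_create_measures_extended measures → Spec_create_measures_extended measures (create_measures_extended measures)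

-- ===== LEMMAS AND PROOFS =====

-- The joint invariant after k steps.
theorem cme_inv (m0 : Int) (rest : List Int) (k : Nat) (hk : k ≤ rest.length) :
    let st := (rest.take k).foldl bStep ([m0], m0, m0, m0)
    st.1 = (PySem.List.pyRange 1 ((k : Int) + 1) 1).foldl (aStep (m0 :: rest)) [m0] ∧
    st.1.length = k + 1 ∧
    st.2.1 = (rest.take k).foldl max m0 ∧
    st.2.2.1 = (m0 :: rest).getD k 0 ∧
    st.1.getD k 0 = st.2.2.2 := by
  induction k with
  | zero =>
    simp [PySem.List.pyRange_one_eq_nil]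
  | succ k ih =>
    have hk' : k < rest.length := by omega
    have ih' := ih (by omega)
    obtain ⟨h1, h2, h3, h4, h5⟩ := ih'
    set st := (rest.take k).foldl bStep ([m0], m0, m0, m0) with hst
    set m : Int := rest[k] with hm
    have htake : rest.take (k + 1) = rest.take k ++ [m] := by
      rw [List.take_add_one, List.getElem?_eq_getElem hk']
      rfl
    have hfold : (rest.take (k + 1)).foldl bStep ([m0], m0, m0, m0) = bStep st m := by
      rw [htake, List.foldl_append, ← hst]
      rfl
    -- the value A reads at index k+1 is m, at index k it is st.2.2.1
    have hget1 : PySem.List.pyGetD (m0 :: rest) ((k : Int) + 1 + 1 - 1) 0 = m := by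
      have : (k : Int) + 1 + 1 - 1 = ((k + 1 : Nat) : Int) := by omega
      rw [this, PySem.List.pyGetD_natCast]
      simp [List.getD, List.getElem?_eq_getElem hk']
      exact hm.symm
    have hget0 : PySem.List.pyGetD (m0 :: rest) ((k : Int) + 1 - 1) 0 = st.2.2.1 := by
      have : (k : Int) + 1 - 1 = ((k : Nat) : Int) := by omega
      rw [this, PySem.List.pyGetD_natCast, h4]
    -- the prefix max A recomputes is st.2.1
    have hmax : pyMaxD (PySem.List.slice (m0 :: rest) none (some ((k : Int) + 1))) = st.2.1 := by
      have hcast : (k : Int) + 1 = ((k + 1 : Nat) : Int) := by omega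
      rw [hcast, PySem.List.slice_to_natCast]
      have : (m0 :: rest).take (k + 1) = m0 :: rest.take k := by
        simp [List.take_succ_cons]
      rw [this]
      unfold pyMaxD
      rw [PySem.List.max?_id_cons]
      simp [h3]
    -- A reads new_measures[i-1] = st.2.2.2
    have hacc : PySem.List.pyGetD st.1 ((k : Int) + 1 - 1) 0 = st.2.2.2 := by
      have : (k : Int) + 1 - 1 = ((k : Nat) : Int) := by omega
      rw [this, PySem.List.pyGetD_natCast, h5]
    -- split A's range at the last index
    have hrange : PySem.List.pyRange 1 ((k : Int) + 1 + 1) 1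
        = PySem.List.pyRange 1 ((k : Int) + 1) 1 ++ [(k : Int) + 1] := by
      exact PySem.List.pyRange_one_succ_right (by omega)
    have hAfold : (PySem.List.pyRange 1 ((k : Int) + 1 + 1) 1).foldl (aStep (m0 :: rest)) [m0]
        = aStep (m0 :: rest) st.1 ((k : Int) + 1) := by
      rw [hrange, List.foldl_append, ← h1]
      simp
    -- compute both steps
    have hnew : aStep (m0 :: rest) st.1 ((k : Int) + 1)
        = st.1 ++ [if m < st.2.1 then (if m == st.2.2.1 then st.2.2.2 else st.2.2.2 + 1) else m] := by
      unfold aStep same_measure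
      rw [hmax, hacc, hget0]
      have : PySem.List.pyGetD (m0 :: rest) ((k : Int) + 1) 0 = m := by
        have h11 : (k : Int) + 1 = (k : Int) + 1 + 1 - 1 := by ring
        rw [h11, hget1]
      rw [this]
      split_ifs <;> rfl
    have hbStep : bStep st m
        = (st.1 ++ [if m < st.2.1 then (if m == st.2.2.1 then st.2.2.2 else st.2.2.2 + 1) else m],
           if m > st.2.1 then m else st.2.1, m,
           if m < st.2.1 then (if m == st.2.2.1 then st.2.2.2 else st.2.2.2 + 1) else m) := by
      rfl
    set new : Int := if m < st.2.1 then (if m == st.2.2.1 then st.2.2.2 else st.2.2.2 + 1) else m with hnewdef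
    have hcast2 : (((k + 1 : Nat)) : Int) + 1 = (k : Int) + 1 + 1 := by omega
    refine ⟨?_, ?_, ?_, ?_, ?_⟩
    · rw [hfold, hcast2, hAfold, hnew, hbStep]
    · rw [hfold, hbStep]
      simp [h2]
    · rw [hfold, hbStep, htake, List.foldl_append]
      simp only [List.foldl_cons, List.foldl_nil, ← h3]
      rcases lt_or_ge st.2.1 m with h | h
      · simp [h, max_eq_right (le_of_lt h)]
      · have hng : ¬ (m > st.2.1) := by omega
        simp [hng, max_eq_left h]
    · rw [hfold, hbStep]
      simp [List.getD, List.getElem?_eq_getElem hk']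
      exact hm
    · rw [hfold, hbStep]
      have hlen : st.1.length = k + 1 := h2
      simp [List.getD, hlen]

-- ===== VERDICT (by name: the statement is the Claim_ definition above) =====
theorem create_measures_extended_spec : Claim_equal_create_measures_extended := by
  intro measures _ hpre
  unfold Spec_create_measures_extended
  match measures with
  | [] => exact absurd rfl hpre
  | m0 :: rest =>
    have h := cme_inv m0 rest rest.length (le_refl _)
    simp only [List.take_length] at h
    show (PySem.List.pyRange 1 ((m0 :: rest).length : Int) 1).foldl (aStep (m0 :: rest)) [m0] =
      (rest.foldl bStep ([m0], m0, m0, m0)).1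
    have hl : ((m0 :: rest).length : Int) = (rest.length : Int) + 1 := by
      simp
    rw [h.1, hl]
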